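-- pv_equiv track=rewrite | github.com/brnunez15/ayed1-2025-tps | TP3/ej2.py | patron_b
-- ===== SOURCE A (Python) =====
-- def copiar(m):
--     nueva = [[elem for elem in sublista] for sublista in m]
--     return nueva
--
-- def patron_b(m: list[list[int]]):
--     nueva = copiar(m)
--     largo = len(nueva)
--     for f in range(largo):
--         for c in range(largo):
--             if f + c == largo - 1:
--                 nueva[f][c] = 3 ** (largo - 1 - f)
--     return nueva
-- ===== SOURCE B (Python) =====
-- def patron_b(m: list[list[int]]):
--     nueva = [fila[:] for fila in m]
--     n = len(nueva)
--     for f in range(n):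
--         nueva[f][n - 1 - f] = 3 ** (n - 1 - f)
--     return nueva
-- ===== Notes on version B (the rewrite author's own statement) =====
-- stated objective: simpler
-- what changed: B writes the anti-diagonal directly with one O(n) loop (nueva[f][n-1-f] = 3**(n-1-f)) instead of A's O(n^2) nested scan testing f+c == n-1 at every cell.
import Mathlib
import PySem

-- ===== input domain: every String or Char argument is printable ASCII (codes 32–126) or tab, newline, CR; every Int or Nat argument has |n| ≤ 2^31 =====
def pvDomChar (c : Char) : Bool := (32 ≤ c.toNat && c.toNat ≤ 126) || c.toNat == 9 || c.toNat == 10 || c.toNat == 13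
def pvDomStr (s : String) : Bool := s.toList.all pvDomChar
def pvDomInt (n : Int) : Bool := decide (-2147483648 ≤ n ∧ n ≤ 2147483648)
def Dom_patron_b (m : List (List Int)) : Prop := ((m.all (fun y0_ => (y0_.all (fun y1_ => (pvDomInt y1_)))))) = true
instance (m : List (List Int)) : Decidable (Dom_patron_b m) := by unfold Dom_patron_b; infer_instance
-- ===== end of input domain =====

-- B replaces A's O(n^2) nested scan (testing f+c == n-1 at every cell) with one O(n) loop
-- writing the anti-diagonal directly; objective: simpler.

-- ===== PORT A =====
def copiar (m : List (List Int)) : List (List Int) :=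
  m.map (fun sublista => sublista.map (fun elem => elem))

def patron_b (m : List (List Int)) : List (List Int) :=
  let nueva := copiar m
  let largo := nueva.length
  (PySem.List.pyRange 0 (largo : Int) 1).foldl (fun nueva f =>
    (PySem.List.pyRange 0 (largo : Int) 1).foldl (fun nueva c =>
      if f + c = (largo : Int) - 1 then
        PySem.List.pySetD nueva f
          (PySem.List.pySetD (PySem.List.pyGetD nueva f []) c (3 ^ ((largo : Int) - 1 - f).toNat))
      else nueva) nueva) nueva

-- ===== PORT B =====
def patron_b_alt (m : List (List Int)) : List (List Int) :=
  let nueva := m.map (fun fila => PySem.List.slice fila none none)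
  let n := nueva.length
  (PySem.List.pyRange 0 (n : Int) 1).foldl (fun nv f =>
    PySem.List.pySetD nv f
      (PySem.List.pySetD (PySem.List.pyGetD nv f []) ((n : Int) - 1 - f)
        (3 ^ ((n : Int) - 1 - f).toNat))) nueva

-- ===== PRECONDITION & SPEC =====
-- Pre_ excludes exactly the inputs where Python A raises IndexError: a row f shorter than
-- length - f, so the anti-diagonal cell m[f][len(m)-1-f] does not exist (B raises there too).
def Pre_patron_b (m : List (List Int)) : Prop :=
  ∀ f, (hf : f < m.length) → m.length - f ≤ m[f].length
instance (m : List (List Int)) : Decidable (Pre_patron_b m) := by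
  unfold Pre_patron_b; infer_instance

def pvWitness_patron_b : List (List Int) := [[1, 2, 3], [4, 5, 6], [7, 8, 9]]

def Spec_patron_b (m : List (List Int)) (out : List (List Int)) : Prop := out = patron_b_alt m
instance (m : List (List Int)) (out : List (List Int)) : Decidable (Spec_patron_b m out) := by
  unfold Spec_patron_b; infer_instance

-- ===== CLAIM (what is proved, stated in full; the proofs are below) =====
def Claim_equal_patron_b : Prop :=
  ∀ (m : List (List Int)), Dom_patron_b m → Pre_patron_b m → Spec_patron_b m (patron_b m)

-- ===== LEMMAS AND PROOFS =====

-- the inner scan does nothing when the single firing index is absent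
theorem foldl_ite_notmem {σ : Type} (g : σ → Int → σ) (t : Int) (l : List Int)
    (h : t ∉ l) (s : σ) :
    l.foldl (fun s c => if c = t then g s c else s) s = s := by
  induction l generalizing s with
  | nil => rfl
  | cons c rest ih =>
    simp only [List.foldl_cons]
    have hc : c ≠ t := fun hct => h (hct ▸ List.mem_cons_self)
    simp only [if_neg hc]
    exact ih (fun ht => h (List.mem_cons_of_mem _ ht)) s

-- the inner scan with exactly one firing index collapses to that single update
theorem foldl_ite_single {σ : Type} (g : σ → Int → σ) (t : Int) (l : List Int)
    (hn : l.Nodup) (ht : t ∈ l) (s : σ) :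
    l.foldl (fun s c => if c = t then g s c else s) s = g s t := by
  induction l generalizing s with
  | nil => cases ht
  | cons c rest ih =>
    simp only [List.foldl_cons]
    rcases List.mem_cons.mp ht with hct | hrest
    · subst hct
      simp only [if_pos]
      exact foldl_ite_notmem g t rest (List.nodup_cons.mp hn).1 (g s t)
    · have hc : c ≠ t := by
        intro h; subst h; exact (List.nodup_cons.mp hn).1 hrest
      simp only [if_neg hc]
      exact ih (List.nodup_cons.mp hn).2 hrest s

theorem nodup_pyRange_zero (n : Nat) : (PySem.List.pyRange 0 (n : Int) 1).Nodup := by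
  rw [PySem.List.pyRange_zero_natCast]
  exact (List.nodup_range).map (fun a b h => by exact_mod_cast h)

theorem copiar_id (m : List (List Int)) : copiar m = m := by
  simp [copiar]

theorem patron_b_eq_alt (m : List (List Int)) : patron_b m = patron_b_alt m := by
  unfold patron_b patron_b_alt
  simp only [copiar_id, PySem.List.slice_none_none, List.map_id']
  apply PySem.List.foldl_congr_mem
  intro acc f hf
  obtain ⟨hf0, hfn⟩ := PySem.List.mem_pyRange_one.mp hf
  have hmem : ((m.length : Int) - 1 - f) ∈ PySem.List.pyRange 0 (m.length : Int) 1 :=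
    PySem.List.mem_pyRange_one.mpr ⟨by omega, by omega⟩
  have := foldl_ite_single
    (fun s c => PySem.List.pySetD s f
      (PySem.List.pySetD (PySem.List.pyGetD s f []) c (3 ^ ((m.length : Int) - 1 - f).toNat)))
    ((m.length : Int) - 1 - f) (PySem.List.pyRange 0 (m.length : Int) 1)
    (nodup_pyRange_zero m.length) hmem acc
  rw [← this]
  apply PySem.List.foldl_congr_mem
  intro s c _
  by_cases hc : f + c = (m.length : Int) - 1
  · have : c = (m.length : Int) - 1 - f := by omega
    simp [this]
  · have : c ≠ (m.length : Int) - 1 - f := by omega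
    simp [hc, this]

-- ===== VERDICT (by name: the statement is the Claim_ definition above) =====
theorem patron_b_spec : Claim_equal_patron_b := by
  intro m _ _
  exact patron_b_eq_alt m
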